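-- pv_equiv track=rewrite | github.com/Wroztee/dnd_ghosts_of_saltmarsh_volejbal | logseq2md.py | add_file_extension_to_links
-- ===== SOURCE A (Python) =====
-- IMAGE_FILE_EXTENSIONS = [".png", ".jpg", ".svg", ".pdf"]
--
-- def add_file_extension_to_links(line: str):
--     new_line = line
--     start_find = 0
--     while start_find != -1:
--         start_find = new_line.find("](", start_find)
--         if start_find == -1:
--             break
--         content_start = start_find
--         start_find = new_line.find(")", start_find)
--         if start_find != -1 and not new_line[start_find - 4 : start_find] in IMAGE_FILE_EXTENSIONS and new_line[start_find - 3 : start_find] != ".md":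
--             new_line = new_line[:content_start] + new_line[content_start:start_find].replace(' ', '_') + new_line[start_find:].replace(")", ".md)", 1)
--     return new_line
-- ===== SOURCE B (Python) =====
-- IMAGE_FILE_EXTENSIONS = [".png", ".jpg", ".svg", ".pdf"]
--
-- def add_file_extension_to_links(line: str):
--     # single left-to-right pass over the remaining suffix, emitting output chunks;
--     # no re-scanning of a mutated string, each link decided from its own segment
--     out = []
--     rest = line
--     while rest:
--         if rest.startswith(']('):
--             j = rest.find(')')
--             if j == -1:
--                 out.append(rest)
--                 break
--             seg = rest[:j]                       # "](" + link content (no ')')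
--             if seg[-4:] in IMAGE_FILE_EXTENSIONS or seg[-3:] == '.md':
--                 out.append(seg + ')')
--             else:
--                 out.append(seg.replace(' ', '_') + '.md)')
--             rest = rest[j + 1:]
--         else:
--             out.append(rest[0])
--             rest = rest[1:]
--     return ''.join(out)
-- ===== Notes on version B (the rewrite author's own statement) =====
-- stated objective: alternative
-- what changed: Replaces A's repeated find/slice/rebuild loop over a mutated string (re-searching from a shared index) with a single left-to-right pass over the remaining suffix that emits output chunks into a list and joins once; each link's image/.md check is decided from the matched segment itself instead of global-index slices.
import Mathlib
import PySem

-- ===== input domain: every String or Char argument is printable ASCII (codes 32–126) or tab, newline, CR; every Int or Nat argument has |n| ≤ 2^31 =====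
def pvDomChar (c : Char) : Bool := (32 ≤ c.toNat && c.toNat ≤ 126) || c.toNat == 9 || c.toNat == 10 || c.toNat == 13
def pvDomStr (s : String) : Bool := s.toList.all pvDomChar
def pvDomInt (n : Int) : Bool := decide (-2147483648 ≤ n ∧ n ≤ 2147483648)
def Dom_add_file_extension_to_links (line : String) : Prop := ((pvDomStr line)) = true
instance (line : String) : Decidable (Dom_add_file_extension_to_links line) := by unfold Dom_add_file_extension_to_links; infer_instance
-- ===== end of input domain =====

-- B replaces A's repeated find/slice/rebuild loop over a mutated string with a single
-- left-to-right pass emitting output chunks (objective: alternative structure, same cost).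


-- ===== PORT A =====
-- module constant IMAGE_FILE_EXTENSIONS (strings modelled as char lists)
def IMAGE_FILE_EXTENSIONS : List (List Char) :=
  [['.', 'p', 'n', 'g'], ['.', 'j', 'p', 'g'], ['.', 's', 'v', 'g'], ['.', 'p', 'd', 'f']]

-- hand port of `.replace(")", ".md)", 1)` (PySem.Chars.replace has no count argument):
-- replace the FIRST ')' by ".md)" — exact for this old/new pair on every input.
def pvReplaceParenOnce : List Char → List Char
  | [] => []
  | c :: t => if c = ')' then '.' :: 'm' :: 'd' :: ')' :: t else c :: pvReplaceParenOnce t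

-- number of occurrences of "](" — the termination measure of A's while loop
def pvCountSub : List Char → Nat
  | [] => 0
  | c :: t => (if c = ']' ∧ t.head? = some '(' then 1 else 0) + pvCountSub t

theorem pv_isPrefixOf_nil_false (sub : List Char) (hne : sub ≠ []) : sub.isPrefixOf ([] : List Char) = false := by
  cases sub with
  | nil => exact absurd rfl hne
  | cons a u => rfl

theorem pv_find_go_cases (sub : List Char) (hne : sub ≠ []) :
    ∀ (l : List Char) (k : Nat),
      (PySem.Chars.find.go sub l k = -1 ∧ ∀ m : Nat, sub.isPrefixOf (l.drop m) = false) ∨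
      (∃ m : Nat, PySem.Chars.find.go sub l k = ((k + m : Nat) : Int) ∧
        sub.isPrefixOf (l.drop m) = true ∧ ∀ m' : Nat, m' < m → sub.isPrefixOf (l.drop m') = false) := by
  intro l
  induction l with
  | nil =>
    intro k
    left
    constructor
    · simp [PySem.Chars.find.go, List.isEmpty_iff, hne]
    · intro m; simpa using pv_isPrefixOf_nil_false sub hne
  | cons c t ih =>
    intro k
    cases hpre : sub.isPrefixOf (c :: t) with
    | true =>
      right
      exact ⟨0, by simp [PySem.Chars.find.go, hpre], by simpa using hpre, by omega⟩
    | false =>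
      rcases ih (k + 1) with ⟨h1, h2⟩ | ⟨m, h1, h2, h3⟩
      · left
        refine ⟨by simp [PySem.Chars.find.go, hpre, h1], ?_⟩
        intro m
        cases m with
        | zero => simpa using hpre
        | succ m => simpa using h2 m
      · right
        refine ⟨m + 1, ?_, by simpa using h2, ?_⟩
        · rw [show PySem.Chars.find.go sub (c :: t) k = PySem.Chars.find.go sub t (k + 1) by
            simp [PySem.Chars.find.go, hpre], h1]
          push_cast; ring
        · intro m' hm'
          cases m' with
          | zero => simpa using hpre
          | succ m' => simpa using h3 m' (by omega)

theorem pv_findFrom_occ (s sub : List Char) (hne : sub ≠ []) (i : Int)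
    (h : PySem.Chars.findFrom s sub i none ≠ -1) :
    ∃ q : Nat, PySem.Chars.findFrom s sub i none = (q : Int) ∧ i.toNat ≤ q ∧
      sub.isPrefixOf (s.drop q) = true := by
  have hst : ∃ st : Nat, (if i < 0 then if i + s.length < 0 then 0 else i + s.length else i) = (st : Int) ∧ i.toNat ≤ st := by
    split_ifs with h1 h2
    · exact ⟨0, rfl, by omega⟩
    · exact ⟨(i + s.length).toNat, by omega, by omega⟩
    · exact ⟨i.toNat, by omega, le_rfl⟩
  obtain ⟨st, hsteq, hstle⟩ := hst
  by_cases hlt : (s.length : Int) < (if i < 0 then if i + s.length < 0 then 0 else i + s.length else i)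
  · exfalso; apply h; simp [PySem.Chars.findFrom]; omega
  · rcases pv_find_go_cases sub hne (s.drop st) 0 with ⟨h1, _⟩ | ⟨m, h1, h2, _⟩
    · exfalso; apply h
      simp only [PySem.Chars.findFrom, PySem.Chars.find]
      rw [if_neg hlt, hsteq]
      simp only [Int.toNat_natCast, List.take_length]
      simp [h1]
    · refine ⟨st + m, ?_, by omega, by rw [List.drop_drop] at h2; simpa [Nat.add_comm] using h2⟩
      simp only [PySem.Chars.findFrom, PySem.Chars.find]
      rw [if_neg hlt, hsteq]
      simp only [Int.toNat_natCast, List.take_length]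
      rw [h1]
      have : ¬(((0 + m : Nat) : Int) = -1) := by omega
      rw [if_neg this]
      push_cast
      ring

theorem pv_countSub_drop_le : ∀ (l : List Char) (k : Nat), pvCountSub (l.drop k) ≤ pvCountSub l := by
  intro l
  induction l with
  | nil => intro k; simp
  | cons c t ih =>
    intro k
    cases k with
    | zero => simp
    | succ k =>
      calc pvCountSub ((c :: t).drop (k + 1)) = pvCountSub (t.drop k) := rfl
        _ ≤ pvCountSub t := ih k
        _ ≤ pvCountSub (c :: t) := by simp [pvCountSub]

theorem pv_countSub_drop_lt : ∀ (l : List Char) (a k : Nat), a < k →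
    ([']', '('] : List Char).isPrefixOf (l.drop a) = true → pvCountSub (l.drop k) < pvCountSub l := by
  intro l
  induction l with
  | nil => intro a k _ h; rw [List.drop_nil] at h; exact absurd h (by simp)
  | cons c t ih =>
    intro a k hak hocc
    cases a with
    | zero =>
      simp only [List.drop_zero] at hocc
      obtain ⟨u, hu⟩ : ∃ u, c :: t = ']' :: '(' :: u := by
        rw [List.isPrefixOf_iff_prefix] at hocc
        obtain ⟨u, hu⟩ := hocc
        exact ⟨u, hu.symm⟩
      cases k with
      | zero => omega
      | succ k =>
        have h1 : pvCountSub ((c :: t).drop (k + 1)) = pvCountSub (t.drop k) := rfl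
        have h2 : pvCountSub (c :: t) = 1 + pvCountSub t := by
          cases hu
          simp [pvCountSub]
        rw [h1, h2]
        have := pv_countSub_drop_le t k
        omega
    | succ a =>
      cases k with
      | zero => omega
      | succ k =>
        have h1 : pvCountSub ((c :: t).drop (k + 1)) = pvCountSub (t.drop k) := rfl
        rw [h1]
        have := ih a k (by omega) (by simpa using hocc)
        have h2 : pvCountSub t ≤ pvCountSub (c :: t) := by simp [pvCountSub]
        omega

theorem pv_countSub_window (s : List Char) (a u v : Nat) (hu : u ≤ a) (hav : a < v)
    (hocc : ([']', '('] : List Char).isPrefixOf (s.drop a) = true) :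
    pvCountSub (s.drop v) < pvCountSub (s.drop u) := by
  have h1 : s.drop v = (s.drop u).drop (v - u) := by rw [List.drop_drop]; congr 1 <;> omega
  have h2 : s.drop a = (s.drop u).drop (a - u) := by rw [List.drop_drop]; congr 1 <;> omega
  rw [h1]
  exact pv_countSub_drop_lt (s.drop u) (a - u) (v - u) (by omega) (by rw [← h2]; exact hocc)

theorem pv_replace_go_space : ∀ (fuel : Nat) (l acc : List Char), l.length ≤ fuel →
    PySem.Chars.replace.go [' '] ['_'] fuel l acc =
      acc.reverse ++ l.map (fun c => if c = ' ' then '_' else c) := by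
  intro fuel
  induction fuel with
  | zero =>
    intro l acc hl
    have : l = [] := by cases l <;> simp_all
    subst this
    simp [PySem.Chars.replace.go]
  | succ fuel ih =>
    intro l acc hl
    cases l with
    | nil => simp [PySem.Chars.replace.go]
    | cons c t =>
      by_cases hc : c = ' '
      · subst hc
        have hpre : ([' '] : List Char).isPrefixOf (' ' :: t) = true := by simp [List.isPrefixOf]
        rw [show PySem.Chars.replace.go [' '] ['_'] (fuel + 1) (' ' :: t) acc =
            PySem.Chars.replace.go [' '] ['_'] fuel t ('_' :: acc) by
          simp [PySem.Chars.replace.go, hpre]]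
        rw [ih t ('_' :: acc) (by simpa using hl)]
        simp
      · have hpre : ([' '] : List Char).isPrefixOf (c :: t) = false := by
          simp [List.isPrefixOf]
          exact fun h => hc h.symm
        rw [show PySem.Chars.replace.go [' '] ['_'] (fuel + 1) (c :: t) acc =
            PySem.Chars.replace.go [' '] ['_'] fuel t (c :: acc) by
          simp [PySem.Chars.replace.go, hpre]]
        rw [ih t (c :: acc) (by simpa using hl)]
        simp [hc]

theorem pv_replace_space (l : List Char) :
    PySem.Chars.replace l [' '] ['_'] = l.map (fun c => if c = ' ' then '_' else c) := by
  simpa [PySem.Chars.replace] using pv_replace_go_space l.length l [] le_rfl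

theorem pv_prefix_ex {l pre : List Char} (h : pre.isPrefixOf l = true) : ∃ u, l = pre ++ u := by
  rw [List.isPrefixOf_iff_prefix] at h
  obtain ⟨u, hu⟩ := h
  exact ⟨u, hu.symm⟩

theorem pv_drop_succ_of_drop_cons {s : List Char} {j : Nat} {c : Char} {w : List Char}
    (h : s.drop j = c :: w) : s.drop (j + 1) = w := by
  have : (s.drop j).drop 1 = s.drop (j + 1) := by rw [List.drop_drop]
  rw [h] at this
  simpa using this.symm

theorem pv_occ_shape (s : List Char) (i : Int)
    (hp : PySem.Chars.findFrom s [']', '('] i none ≠ -1)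
    (hj : PySem.Chars.findFrom s [')'] (PySem.Chars.findFrom s [']', '('] i none) none ≠ -1) :
    ∃ (p j : Nat), PySem.Chars.findFrom s [']', '('] i none = (p : Int) ∧
      PySem.Chars.findFrom s [')'] (PySem.Chars.findFrom s [']', '('] i none) none = (j : Int) ∧
      i.toNat ≤ p ∧ p + 2 ≤ j ∧ j < s.length ∧
      ([']', '('] : List Char).isPrefixOf (s.drop p) = true ∧
      s.drop j = ')' :: s.drop (j + 1) := by
  obtain ⟨p, hpe, hip, hpocc⟩ := pv_findFrom_occ s [']', '('] (by simp) i hp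
  rw [hpe] at hj ⊢
  obtain ⟨j, hje, hpj, hjocc⟩ := pv_findFrom_occ s [')'] (by simp) (p : Int) hj
  simp only [Int.toNat_natCast] at hpj
  obtain ⟨u, hu⟩ := pv_prefix_ex hpocc
  obtain ⟨w, hw⟩ := pv_prefix_ex hjocc
  simp only [List.cons_append, List.nil_append] at hu hw
  have hj1 : s.drop (j + 1) = w := pv_drop_succ_of_drop_cons hw
  have hjp2 : p + 2 ≤ j := by
    rcases Nat.lt_or_ge j (p + 2) with hlt | hge
    · exfalso
      have hcase : j = p ∨ j = p + 1 := by omega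
      rcases hcase with rfl | rfl
      · rw [hu] at hw; exact absurd (List.head_eq_of_cons_eq hw) (by decide)
      · have : s.drop (p + 1) = '(' :: u := pv_drop_succ_of_drop_cons hu
        rw [this] at hw; exact absurd (List.head_eq_of_cons_eq hw) (by decide)
    · exact hge
  have hjlen : j < s.length := by
    have : s.drop j ≠ [] := by rw [hw]; simp
    by_contra hle
    rw [List.drop_eq_nil_of_le (by omega)] at this
    exact this rfl
  exact ⟨p, j, rfl, hje, hip, hjp2, hjlen, hpocc, by rw [hw, hj1]⟩

theorem pv_countSub_mdTail (l : List Char) :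
    pvCountSub ('.' :: 'm' :: 'd' :: ')' :: l) = pvCountSub (')' :: l) := by
  simp [pvCountSub]

theorem pv_dec_skip (s : List Char) (i : Int)
    (hp : PySem.Chars.findFrom s [']', '('] i none ≠ -1)
    (hj : PySem.Chars.findFrom s [')'] (PySem.Chars.findFrom s [']', '('] i none) none ≠ -1) :
    pvCountSub (s.drop (PySem.Chars.findFrom s [')'] (PySem.Chars.findFrom s [']', '('] i none) none).toNat)
      < pvCountSub (s.drop i.toNat) := by
  obtain ⟨p, j, hpe, hje, hip, hpj, hjlen, hpocc, hjtail⟩ := pv_occ_shape s i hp hj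
  rw [hje]
  simp only [Int.toNat_natCast]
  exact pv_countSub_window s p i.toNat j hip (by omega) hpocc

theorem pv_dec_mod (s : List Char) (i : Int)
    (hp : PySem.Chars.findFrom s [']', '('] i none ≠ -1)
    (hj : PySem.Chars.findFrom s [')'] (PySem.Chars.findFrom s [']', '('] i none) none ≠ -1) :
    pvCountSub ((PySem.List.slice s none (some (PySem.Chars.findFrom s [']', '('] i none)) ++
        PySem.Chars.replace (PySem.List.slice s (some (PySem.Chars.findFrom s [']', '('] i none))
          (some (PySem.Chars.findFrom s [')'] (PySem.Chars.findFrom s [']', '('] i none) none))) [' '] ['_'] ++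
        pvReplaceParenOnce (PySem.List.slice s
          (some (PySem.Chars.findFrom s [')'] (PySem.Chars.findFrom s [']', '('] i none) none)) none)).drop
        (PySem.Chars.findFrom s [')'] (PySem.Chars.findFrom s [']', '('] i none) none).toNat)
      < pvCountSub (s.drop i.toNat) := by
  obtain ⟨p, j, hpe, hje, hip, hpj, hjlen, hpocc, hjtail⟩ := pv_occ_shape s i hp hj
  rw [hje, hpe]
  simp only [Int.toNat_natCast]
  rw [PySem.List.slice_to_natCast, PySem.List.slice_natCast, PySem.List.slice_from_natCast]
  rw [hjtail]
  have hlen : (s.take p ++ PySem.Chars.replace ((s.drop p).take (j - p)) [' '] ['_']).length = j := by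
    rw [pv_replace_space]
    simp only [List.length_append, List.length_take, List.length_map, List.length_drop]
    omega
  have hgen : ∀ (X Y : List Char), X.length = j → (X ++ Y).drop j = Y := by
    intro X Y hX; rw [← hX, List.drop_left]
  rw [hgen _ _ hlen]
  have hrepl : pvReplaceParenOnce (')' :: s.drop (j + 1)) = '.' :: 'm' :: 'd' :: ')' :: s.drop (j + 1) := by
    simp [pvReplaceParenOnce]
  rw [hrepl, pv_countSub_mdTail, ← hjtail]
  exact pv_countSub_window s p i.toNat j hip (by omega) hpocc

-- A's while loop: state = (current string, start_find); each arm re-reads the finds like the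
-- Python re-reads its variables; `j = -1` falls through the loop test and returns new_line.
def pvALoop (new_line : List Char) (start_find : Int) : List Char :=
  if hp : PySem.Chars.findFrom new_line [']', '('] start_find none = -1 then new_line
  else
    if hj : PySem.Chars.findFrom new_line [')'] (PySem.Chars.findFrom new_line [']', '('] start_find none) none = -1 then
      new_line
    else
      if PySem.List.slice new_line
            (some (PySem.Chars.findFrom new_line [')'] (PySem.Chars.findFrom new_line [']', '('] start_find none) none - 4))
            (some (PySem.Chars.findFrom new_line [')'] (PySem.Chars.findFrom new_line [']', '('] start_find none) none))
            ∉ IMAGE_FILE_EXTENSIONS ∧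
         PySem.List.slice new_line
            (some (PySem.Chars.findFrom new_line [')'] (PySem.Chars.findFrom new_line [']', '('] start_find none) none - 3))
            (some (PySem.Chars.findFrom new_line [')'] (PySem.Chars.findFrom new_line [']', '('] start_find none) none))
            ≠ ['.', 'm', 'd'] then
        pvALoop
          (PySem.List.slice new_line none (some (PySem.Chars.findFrom new_line [']', '('] start_find none)) ++
            PySem.Chars.replace (PySem.List.slice new_line (some (PySem.Chars.findFrom new_line [']', '('] start_find none))
              (some (PySem.Chars.findFrom new_line [')'] (PySem.Chars.findFrom new_line [']', '('] start_find none) none))) [' '] ['_'] ++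
            pvReplaceParenOnce (PySem.List.slice new_line
              (some (PySem.Chars.findFrom new_line [')'] (PySem.Chars.findFrom new_line [']', '('] start_find none) none)) none))
          (PySem.Chars.findFrom new_line [')'] (PySem.Chars.findFrom new_line [']', '('] start_find none) none)
      else
        pvALoop new_line (PySem.Chars.findFrom new_line [')'] (PySem.Chars.findFrom new_line [']', '('] start_find none) none)
termination_by pvCountSub (new_line.drop start_find.toNat)
decreasing_by
  · exact pv_dec_mod new_line start_find hp hj
  · exact pv_dec_skip new_line start_find hp hj

def add_file_extension_to_links (line : String) : String :=
  String.ofList (pvALoop line.toList 0)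

-- ===== PORT B =====
theorem pv_find_nonneg (l sub : List Char) (hne : sub ≠ [])
    (h : PySem.Chars.find l sub ≠ -1) : ∃ m : Nat, PySem.Chars.find l sub = (m : Int) := by
  rcases pv_find_go_cases sub hne l 0 with ⟨h1, _⟩ | ⟨m, h1, _, _⟩
  · exact absurd (by simpa [PySem.Chars.find] using h1) h
  · exact ⟨m, by simpa [PySem.Chars.find] using h1⟩

theorem pv_bGo_dec (c : Char) (t : List Char)
    (hj : PySem.Chars.find (c :: t) [')'] ≠ -1) :
    (PySem.List.slice (c :: t) (some (PySem.Chars.find (c :: t) [')'] + 1)) none).length < t.length + 1 := by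
  obtain ⟨m, hm⟩ := pv_find_nonneg (c :: t) [')'] (by simp) hj
  rw [hm]
  rw [show ((m : Int) + 1) = ((m + 1 : Nat) : Int) by push_cast; ring]
  rw [PySem.List.slice_from_natCast]
  simp

-- B's while loop over the remaining suffix; appended chunks become list concatenation
def pvBGo : List Char → List Char
  | [] => []
  | c :: t =>
    if PySem.Chars.startswith (c :: t) [']', '('] then
      if hj : PySem.Chars.find (c :: t) [')'] = -1 then c :: t
      else
        (if PySem.List.slice (PySem.List.slice (c :: t) none (some (PySem.Chars.find (c :: t) [')']))) (some (-4)) none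
              ∈ IMAGE_FILE_EXTENSIONS ∨
            PySem.List.slice (PySem.List.slice (c :: t) none (some (PySem.Chars.find (c :: t) [')']))) (some (-3)) none
              = ['.', 'm', 'd'] then
          PySem.List.slice (c :: t) none (some (PySem.Chars.find (c :: t) [')'])) ++ [')']
        else
          PySem.Chars.replace (PySem.List.slice (c :: t) none (some (PySem.Chars.find (c :: t) [')']))) [' '] ['_'] ++
            ['.', 'm', 'd', ')']) ++
        pvBGo (PySem.List.slice (c :: t) (some (PySem.Chars.find (c :: t) [')'] + 1)) none)
    else c :: pvBGo t
termination_by l => l.length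
decreasing_by
  · exact pv_bGo_dec c t hj
  · simp

def add_file_extension_to_links_alt (line : String) : String :=
  String.ofList (pvBGo line.toList)

-- ===== PRECONDITION & SPEC =====
def Spec_add_file_extension_to_links (line : String) (out : String) : Prop := out = add_file_extension_to_links_alt line
instance (line : String) (out : String) : Decidable (Spec_add_file_extension_to_links line out) := by unfold Spec_add_file_extension_to_links; infer_instance

-- ===== CLAIM (what is proved, stated in full; the proofs are below) =====
def Claim_equal_add_file_extension_to_links : Prop := ∀ (line : String), Dom_add_file_extension_to_links line → Spec_add_file_extension_to_links line (add_file_extension_to_links line)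

-- ===== LEMMAS AND PROOFS =====
theorem pv_findFrom_nat (s sub : List Char) (q : Nat) (hq : q ≤ s.length) :
    PySem.Chars.findFrom s sub (q : Int) none =
      (if PySem.Chars.find (s.drop q) sub = -1 then -1
       else (q : Int) + PySem.Chars.find (s.drop q) sub) := by
  have h0 : ¬((q : Int) < 0) := by omega
  have h1 : ¬((s.length : Int) < (q : Int)) := by omega
  simp [PySem.Chars.findFrom, h0, h1, PySem.Chars.find]

-- fragment to splice before pv_main
theorem pv_startswith_pat (c : Char) (t : List Char) :
    PySem.Chars.startswith (c :: t) [']', '('] = ([']', '('] : List Char).isPrefixOf (c :: t) := rfl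

theorem pv_bGo_cons_no (c : Char) (t : List Char)
    (h : ([']', '('] : List Char).isPrefixOf (c :: t) = false) :
    pvBGo (c :: t) = c :: pvBGo t := by
  rw [pvBGo]
  rw [pv_startswith_pat, h]
  simp

theorem pv_bGo_skip : ∀ (d : Nat) (l : List Char),
    (∀ m, m < d → ([']', '('] : List Char).isPrefixOf (l.drop m) = false) →
    pvBGo l = l.take d ++ pvBGo (l.drop d) := by
  intro d
  induction d with
  | zero => intro l _; simp
  | succ d ih =>
    intro l h
    cases l with
    | nil => simp [pvBGo]
    | cons c t =>
      rw [pv_bGo_cons_no c t (by simpa using h 0 (by omega))]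
      rw [ih t (fun m hm => by simpa using h (m + 1) (by omega))]
      simp

theorem pv_bGo_none : ∀ (l : List Char),
    (∀ m, ([']', '('] : List Char).isPrefixOf (l.drop m) = false) → pvBGo l = l := by
  intro l
  induction l with
  | nil => intro _; simp [pvBGo]
  | cons c t ih =>
    intro h
    rw [pv_bGo_cons_no c t (by simpa using h 0)]
    rw [ih (fun m => by simpa using h (m + 1))]

theorem pv_ext_len : ∀ l ∈ IMAGE_FILE_EXTENSIONS, l.length = 4 := by decide

theorem pv_ext_no_paren : ∀ l ∈ IMAGE_FILE_EXTENSIONS, '(' ∉ l := by decide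

-- slice in terms of clampIdx windows
theorem pv_slice_window (s : List Char) (a b : Int) :
    PySem.List.slice s (some a) (some b) =
      (s.drop (PySem.List.clampIdx s.length a)).take
        (PySem.List.clampIdx s.length b - PySem.List.clampIdx s.length a) := by
  simp [PySem.List.slice]

theorem pv_sliceA_short (s : List Char) (p j d : Nat) (u : List Char)
    (hu : s.drop p = ']' :: '(' :: u) (hpj : p + 2 ≤ j) (hjlen : j < s.length)
    (hshort : j < p + d) (T : List Char) (hT : T.length = d) (hpar : '(' ∉ T) :
    PySem.List.slice s (some ((j : Int) - d)) (some (j : Int)) ≠ T := by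
  intro hEq
  rw [pv_slice_window] at hEq
  have hj0 : ¬((j : Int) < 0) := by omega
  have hcb : PySem.List.clampIdx s.length (j : Int) = j := by
    simp [PySem.List.clampIdx, hj0]
    omega
  rw [hcb] at hEq
  set ca := PySem.List.clampIdx s.length ((j : Int) - d) with hca
  have h1 : s.drop (p + 1) = '(' :: u := pv_drop_succ_of_drop_cons hu
  by_cases hle : ca ≤ p + 1
  · -- '(' lands inside the slice
    apply hpar
    rw [← hEq]
    have hsplit : s.drop ca = List.take (p + 1 - ca) (s.drop ca) ++ '(' :: u := by
      conv_lhs => rw [← List.take_append_drop (p + 1 - ca) (s.drop ca)]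
      rw [List.drop_drop]
      rw [show ca + (p + 1 - ca) = p + 1 from by omega, h1]
    rw [hsplit, List.take_append]
    have hXlen : (List.take (p + 1 - ca) (s.drop ca)).length = p + 1 - ca := by
      simp
      omega
    rw [hXlen]
    obtain ⟨k', hk'⟩ : ∃ k', j - ca - (p + 1 - ca) = k' + 1 := ⟨j - ca - (p + 1 - ca) - 1, by omega⟩
    rw [hk']
    simp
  · -- the slice is shorter than T
    have hlt : p + 1 < ca := by omega
    have : ((s.drop ca).take (j - ca)).length < d := by
      simp
      omega
    rw [hEq, hT] at this
    omega

theorem pv_sliceA_long (s : List Char) (p r d : Nat) (hd : d ≤ r) (_hrle : p + r ≤ s.length) :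
    PySem.List.slice s (some (((p + r : Nat) : Int) - d)) (some ((p + r : Nat) : Int)) =
      ((s.drop p).take r).drop (r - d) := by
  have hcast : ((p + r : Nat) : Int) - d = ((p + r - d : Nat) : Int) := by omega
  rw [hcast, PySem.List.slice_natCast]
  rw [List.drop_take, List.drop_drop]
  congr 1
  · omega
  · congr 1 <;> omega

theorem pv_seg_shape (s : List Char) (p r : Nat) (u : List Char)
    (hu : s.drop p = ']' :: '(' :: u) (hr2 : 2 ≤ r) :
    (s.drop p).take r = ']' :: '(' :: u.take (r - 2) := by
  rw [hu]
  obtain ⟨r', rfl⟩ : ∃ r', r = r' + 2 := ⟨r - 2, by omega⟩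
  simp

theorem pv_seg_len (s : List Char) (p r : Nat) (hlen : p + r ≤ s.length) :
    ((s.drop p).take r).length = r := by
  simp
  omega

theorem pv_marker4 (s : List Char) (p r j : Nat) (u : List Char) (hj : j = p + r)
    (hu : s.drop p = ']' :: '(' :: u) (hr2 : 2 ≤ r) (hlen : p + r < s.length) :
    (PySem.List.slice s (some ((j : Int) - 4)) (some (j : Int)) ∈ IMAGE_FILE_EXTENSIONS ↔
     PySem.List.slice ((s.drop p).take r) (some (-4)) none ∈ IMAGE_FILE_EXTENSIONS) := by
  have hB : PySem.List.slice ((s.drop p).take r) (some (-4)) none = ((s.drop p).take r).drop (r - 4) := by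
    rw [PySem.List.slice_from_neg_ofNat _ 4 (by omega), pv_seg_len s p r (by omega)]
  rw [hB]
  have hc : ((j : Int) - 4) = ((j : Int) - ((4 : Nat) : Int)) := by norm_num
  by_cases h4 : 4 ≤ r
  · rw [hc, hj]
    rw [pv_sliceA_long s p r 4 h4 (by omega)]
  · constructor
    · intro hmem
      rw [hc] at hmem
      exact absurd rfl
        (pv_sliceA_short s p j 4 u hu (by omega) (by omega) (by omega) _
          (pv_ext_len _ hmem) (pv_ext_no_paren _ hmem))
    · intro hmem
      exfalso
      have hdz : r - 4 = 0 := by omega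
      rw [hdz, List.drop_zero, pv_seg_shape s p r u hu hr2] at hmem
      exact pv_ext_no_paren _ hmem (by simp)

theorem pv_marker3 (s : List Char) (p r j : Nat) (u : List Char) (hj : j = p + r)
    (hu : s.drop p = ']' :: '(' :: u) (hr2 : 2 ≤ r) (hlen : p + r < s.length) :
    (PySem.List.slice s (some ((j : Int) - 3)) (some (j : Int)) = ['.', 'm', 'd'] ↔
     PySem.List.slice ((s.drop p).take r) (some (-3)) none = ['.', 'm', 'd']) := by
  have hB : PySem.List.slice ((s.drop p).take r) (some (-3)) none = ((s.drop p).take r).drop (r - 3) := by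
    rw [PySem.List.slice_from_neg_ofNat _ 3 (by omega), pv_seg_len s p r (by omega)]
  rw [hB]
  have hc : ((j : Int) - 3) = ((j : Int) - ((3 : Nat) : Int)) := by norm_num
  by_cases h3 : 3 ≤ r
  · rw [hc, hj]
    rw [pv_sliceA_long s p r 3 h3 (by omega)]
  · constructor
    · intro hmem
      rw [hc] at hmem
      exact absurd hmem
        (pv_sliceA_short s p j 3 u hu (by omega) (by omega) (by omega) ['.', 'm', 'd'] rfl (by decide))
    · intro hmem
      exfalso
      have hdz : r - 3 = 0 := by omega
      rw [hdz, List.drop_zero, pv_seg_shape s p r u hu hr2] at hmem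
      have : r - 2 = 0 := by omega
      rw [this] at hmem
      simp at hmem

theorem pv_findFrom_big (s sub : List Char) (q : Nat) (h : s.length < q) :
    PySem.Chars.findFrom s sub (q : Int) none = -1 := by
  have h0 : ¬((q : Int) < 0) := by omega
  have h1 : (s.length : Int) < (q : Int) := by omega
  simp [PySem.Chars.findFrom, h0, h1]

theorem pv_bGo_stuck (l : List Char) (hpre : ([']', '('] : List Char).isPrefixOf l = true)
    (hf : PySem.Chars.find l [')'] = -1) : pvBGo l = l := by
  obtain ⟨u, hu⟩ := pv_prefix_ex hpre
  simp only [List.cons_append, List.nil_append] at hu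
  subst hu
  rw [pvBGo, pv_startswith_pat, hpre]
  simp [hf]

theorem pv_bGo_link (c2 : Char) (u : List Char) (r : Nat)
    (hpre : ([']', '('] : List Char).isPrefixOf (']' :: c2 :: u) = true)
    (hf : PySem.Chars.find (']' :: c2 :: u) [')'] = ((r : Nat) : Int)) :
    pvBGo (']' :: c2 :: u) =
      (if PySem.List.slice (PySem.List.slice (']' :: c2 :: u) none (some ((r : Nat) : Int))) (some (-4)) none
            ∈ IMAGE_FILE_EXTENSIONS ∨
          PySem.List.slice (PySem.List.slice (']' :: c2 :: u) none (some ((r : Nat) : Int))) (some (-3)) none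
            = ['.', 'm', 'd'] then
        PySem.List.slice (']' :: c2 :: u) none (some ((r : Nat) : Int)) ++ [')']
      else
        PySem.Chars.replace (PySem.List.slice (']' :: c2 :: u) none (some ((r : Nat) : Int))) [' '] ['_'] ++
          ['.', 'm', 'd', ')']) ++
      pvBGo (PySem.List.slice (']' :: c2 :: u) (some (((r : Nat) : Int) + 1)) none) := by
  rw [pvBGo, pv_startswith_pat, hpre]
  simp only [if_true]
  rw [dif_neg (by rw [hf]; omega)]
  simp only [hf]

theorem pv_main : ∀ (k : Nat) (s : List Char) (i : Nat), pvCountSub (s.drop i) = k →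
    pvALoop s (i : Int) = s.take i ++ pvBGo (s.drop i) := by
  intro k
  induction k using Nat.strong_induction_on with
  | _ k IH =>
  intro s i hk
  by_cases hilen : s.length < i
  · rw [pvALoop, dif_pos (pv_findFrom_big s [']', '('] i hilen)]
    rw [List.drop_eq_nil_of_le (by omega), List.take_of_length_le (by omega)]
    simp [pvBGo]
  · have hile : i ≤ s.length := by omega
    rcases pv_find_go_cases [']', '('] (by simp) (s.drop i) 0 with ⟨hgo, hnone⟩ | ⟨m, hgo, hoccm, hminm⟩
    · -- no "](" anywhere from i : A stops, B copies everything
      have hp : PySem.Chars.findFrom s [']', '('] (i : Int) none = -1 := by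
        rw [pv_findFrom_nat s [']', '('] i hile]
        simp [PySem.Chars.find, hgo]
      rw [pvALoop, dif_pos hp, pv_bGo_none (s.drop i) hnone]
      exact (List.take_append_drop i s).symm
    · have hfindp : PySem.Chars.find (s.drop i) [']', '('] = ((m : Nat) : Int) := by
        simpa [PySem.Chars.find] using hgo
      have hpe : PySem.Chars.findFrom s [']', '('] (i : Int) none = ((i + m : Nat) : Int) := by
        rw [pv_findFrom_nat s [']', '('] i hile, hfindp]
        rw [if_neg (by omega)]
        push_cast
        ring
      have hdd : (s.drop i).drop m = s.drop (i + m) := by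
        rw [List.drop_drop]
      have hoccp : ([']', '('] : List Char).isPrefixOf (s.drop (i + m)) = true := by
        rw [← hdd]; exact hoccm
      obtain ⟨u, hu⟩ := pv_prefix_ex hoccp
      simp only [List.cons_append, List.nil_append] at hu
      have hplen : i + m < s.length := by
        by_contra hle
        rw [List.drop_eq_nil_of_le (by omega)] at hu
        exact absurd hu (by simp)
      rcases pv_find_go_cases [')'] (by simp) (s.drop (i + m)) 0 with ⟨hgoj, hnonej⟩ | ⟨r, hgoj, hoccr, hminr⟩
      · -- "](" but no ')' after it: both sides leave the rest unchanged
        have hfj : PySem.Chars.find (s.drop (i + m)) [')'] = -1 := by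
          simpa [PySem.Chars.find] using hgoj
        have hje : PySem.Chars.findFrom s [')'] (PySem.Chars.findFrom s [']', '('] (i : Int) none) none = -1 := by
          rw [hpe, pv_findFrom_nat s [')'] (i + m) (by omega), hfj]
          simp
        rw [pvALoop, dif_neg (by rw [hpe]; omega), dif_pos hje]
        rw [pv_bGo_skip m (s.drop i) (fun m' hm' => hminm m' hm'), hdd]
        rw [pv_bGo_stuck (s.drop (i + m)) hoccp hfj]
        rw [← hdd, List.take_append_drop, List.take_append_drop]
      · -- the full link case
        have hfj : PySem.Chars.find (s.drop (i + m)) [')'] = ((r : Nat) : Int) := by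
          simpa [PySem.Chars.find] using hgoj
        have hje : PySem.Chars.findFrom s [')'] (PySem.Chars.findFrom s [']', '('] (i : Int) none) none
            = ((i + m + r : Nat) : Int) := by
          rw [hpe, pv_findFrom_nat s [')'] (i + m) (by omega), hfj]
          rw [if_neg (by omega)]
          push_cast
          ring
        have hddr : (s.drop (i + m)).drop r = s.drop (i + m + r) := by
          rw [List.drop_drop]
        obtain ⟨w, hw⟩ := pv_prefix_ex hoccr
        simp only [List.cons_append, List.nil_append] at hw
        rw [hddr] at hw
        have hjtail : s.drop (i + m + r) = ')' :: s.drop (i + m + r + 1) := by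
          rw [hw, pv_drop_succ_of_drop_cons hw]
        have hr2 : 2 ≤ r := by
          rcases Nat.lt_or_ge r 2 with hlt | hge
          · exfalso
            have hcase : r = 0 ∨ r = 1 := by omega
            rcases hcase with rfl | rfl
            · rw [Nat.add_zero, hu] at hw
              exact absurd (List.head_eq_of_cons_eq hw) (by decide)
            · have h1 : s.drop (i + m + 1) = '(' :: u := pv_drop_succ_of_drop_cons hu
              rw [h1] at hw
              exact absurd (List.head_eq_of_cons_eq hw) (by decide)
          · exact hge
        have hjlen : i + m + r < s.length := by
          by_contra hle
          rw [List.drop_eq_nil_of_le (by omega)] at hw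
          exact absurd hw (by simp)
        -- unfold A one step
        rw [pvALoop, dif_neg (by rw [hpe]; omega)]
        rw [hje, hpe]
        rw [dif_neg (by omega)]
        -- expand B to the link at position i + m
        rw [pv_bGo_skip m (s.drop i) (fun m' hm' => hminm m' hm'), hdd, hu]
        have hfu : PySem.Chars.find (']' :: '(' :: u) [')'] = ((r : Nat) : Int) := by
          rw [← hu]; exact hfj
        rw [pv_bGo_link '(' u r (by simp [List.isPrefixOf]) hfu]
        -- normalise B's slices
        have hsegB : PySem.List.slice (']' :: '(' :: u) none (some ((r : Nat) : Int)) = (s.drop (i + m)).take r := by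
          rw [PySem.List.slice_to_natCast, hu]
        have htailB : PySem.List.slice (']' :: '(' :: u) (some (((r : Nat) : Int) + 1)) none
            = s.drop (i + m + r + 1) := by
          rw [show ((r : Nat) : Int) + 1 = ((r + 1 : Nat) : Int) by push_cast; ring]
          rw [PySem.List.slice_from_natCast, ← hu, List.drop_drop]
          congr 1
        rw [hsegB, htailB]
        -- marker conditions agree
        have hm4 := pv_marker4 s (i + m) r (i + m + r) u rfl hu hr2 hjlen
        have hm3 := pv_marker3 s (i + m) r (i + m + r) u rfl hu hr2 hjlen
        -- list algebra for reassembly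
        have htake_ip : s.take i ++ (s.drop i).take m = s.take (i + m) := by
          rw [← List.take_add]
        have htake_pj : s.take (i + m) ++ (s.drop (i + m)).take r = s.take (i + m + r) := by
          rw [← List.take_add]
        by_cases hB : PySem.List.slice ((s.drop (i + m)).take r) (some (-4)) none ∈ IMAGE_FILE_EXTENSIONS ∨
            PySem.List.slice ((s.drop (i + m)).take r) (some (-3)) none = ['.', 'm', 'd']
        · -- image / .md link: both sides keep it and move on
          have hAC : ¬(PySem.List.slice s (some (((i + m + r : Nat) : Int) - 4)) (some ((i + m + r : Nat) : Int))
                ∉ IMAGE_FILE_EXTENSIONS ∧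
              PySem.List.slice s (some (((i + m + r : Nat) : Int) - 3)) (some ((i + m + r : Nat) : Int))
                ≠ ['.', 'm', 'd']) := by
            rcases hB with h | h
            · exact fun hc => hc.1 (hm4.mpr h)
            · exact fun hc => hc.2 (hm3.mpr h)
          rw [if_neg hAC, if_pos hB]
          have hlt : pvCountSub (s.drop (i + m + r)) < k := by
            rw [← hk]
            exact pv_countSub_window s (i + m) i (i + m + r) (by omega) (by omega) hoccp
          rw [IH _ hlt s (i + m + r) rfl]
          rw [hjtail, pv_bGo_cons_no ')' _ (by simp [List.isPrefixOf])]
          rw [← htake_pj, ← htake_ip]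
          simp
        · -- ordinary link: A rebuilds the string, B emits the fixed chunk
          push_neg at hB
          rw [if_pos ⟨fun hmem => hB.1 (hm4.mp hmem), fun hmd => hB.2 (hm3.mp hmd)⟩,
            if_neg (by push_neg; exact hB)]
          have hs1 : PySem.List.slice s none (some ((i + m : Nat) : Int)) = s.take (i + m) :=
            PySem.List.slice_to_natCast s (i + m)
          have hs2 : PySem.List.slice s (some ((i + m : Nat) : Int)) (some ((i + m + r : Nat) : Int))
              = (s.drop (i + m)).take r := by
            rw [PySem.List.slice_natCast]
            congr 1
            omega
          have hs3 : PySem.List.slice s (some ((i + m + r : Nat) : Int)) none = s.drop (i + m + r) :=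
            PySem.List.slice_from_natCast s (i + m + r)
          rw [hs1, hs2, hs3, hjtail]
          have hrepl : pvReplaceParenOnce (')' :: s.drop (i + m + r + 1))
              = '.' :: 'm' :: 'd' :: ')' :: s.drop (i + m + r + 1) := by
            simp [pvReplaceParenOnce]
          rw [hrepl]
          have hXlen : (s.take (i + m) ++ PySem.Chars.replace ((s.drop (i + m)).take r) [' '] ['_']).length
              = i + m + r := by
            rw [pv_replace_space]
            simp
            omega
          have hdropX : ((s.take (i + m) ++ PySem.Chars.replace ((s.drop (i + m)).take r) [' '] ['_']) ++
              ('.' :: 'm' :: 'd' :: ')' :: s.drop (i + m + r + 1))).drop (i + m + r)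
              = '.' :: 'm' :: 'd' :: ')' :: s.drop (i + m + r + 1) := by
            rw [← hXlen, List.drop_left]
          have htakeX : ((s.take (i + m) ++ PySem.Chars.replace ((s.drop (i + m)).take r) [' '] ['_']) ++
              ('.' :: 'm' :: 'd' :: ')' :: s.drop (i + m + r + 1))).take (i + m + r)
              = s.take (i + m) ++ PySem.Chars.replace ((s.drop (i + m)).take r) [' '] ['_'] := by
            rw [← hXlen, List.take_left]
          have hlt : pvCountSub (((s.take (i + m) ++ PySem.Chars.replace ((s.drop (i + m)).take r) [' '] ['_']) ++
              ('.' :: 'm' :: 'd' :: ')' :: s.drop (i + m + r + 1))).drop (i + m + r)) < k := by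
            rw [hdropX, pv_countSub_mdTail, ← hjtail, ← hk]
            exact pv_countSub_window s (i + m) i (i + m + r) (by omega) (by omega) hoccp
          rw [IH _ hlt _ (i + m + r) rfl]
          rw [hdropX, htakeX]
          rw [pv_bGo_cons_no '.' _ (by simp [List.isPrefixOf]),
            pv_bGo_cons_no 'm' _ (by simp [List.isPrefixOf]),
            pv_bGo_cons_no 'd' _ (by simp [List.isPrefixOf]),
            pv_bGo_cons_no ')' _ (by simp [List.isPrefixOf])]
          rw [← htake_ip]
          simp

-- ===== VERDICT (by name: the statement is the Claim_ definition above) =====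
theorem add_file_extension_to_links_spec : Claim_equal_add_file_extension_to_links := by
  intro line _
  unfold Spec_add_file_extension_to_links add_file_extension_to_links add_file_extension_to_links_alt
  have h := pv_main (pvCountSub (line.toList.drop 0)) line.toList 0 rfl
  simp only [List.drop_zero, List.take_zero, List.nil_append, Nat.cast_zero] at h
  exact congrArg String.ofList h
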